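-- pv_equiv track=rewrite | github.com/bellecode20/algorithm-archive | 자은/2026-03/12_pgr_노란불 신호등.py | solution
-- ===== SOURCE A (Python) =====
-- def lcm(a,b):
--     for i in range(max(a,b),(a*b)+1):
--         if i%a==0 and i%b==0:
--             return i
--
-- def solution(signals):
--     answer = -1
--     n=len(signals)
--
--     cycle=[sum(lst) for lst in signals] #각 신호등 주기
--
--     lm=cycle[0]
--     for i in range(1,len(cycle)):   #주기들의 최소공배수 구하기
--         lm=lcm(lm,cycle[i])
--
--     for time in range(1,lm+1):
--         cnt=0
--
--         for i in range(n):
--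
--             #(현재시간대를 현재신호등의 주기길이로 나누었을때)나머지가 초록불의 시간범위보다 같거나 작다면 초록불임
--             if time%cycle[i]<=signals[i][0]:   #초록불
--                 break
--
--             #나머지가 해당 신호등의 노랑불의 시간범위 안에 있으면 노랑불임
--             elif time%cycle[i]<=signals[i][0]+signals[i][1]:    #노란불
--                 cnt+=1
--             else:   #그 외 빨강불
--                 break
--
--         if cnt==n:  #모든 신호등이 현재 시간대에 노랑불이면
--             answer=time
--             break
--
--     return answer
-- ===== SOURCE B (Python) =====
-- def gcd(a, b):
--     while b:
--         a, b = b, a % b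
--     return a
--
--
-- def solution(signals):
--     cycles = [sum(s) for s in signals]
--     lm = cycles[0]
--     for c in cycles[1:]:
--         lm = lm * c // gcd(lm, c)
--     cand = range(1, lm + 1)
--     for sig, c in zip(signals, cycles):
--         g, y = sig[0], sig[1]
--         cand = [t for t in cand if g < t % c <= g + y]
--     return cand[0] if cand else -1
-- ===== Notes on version B (the rewrite author's own statement) =====
-- stated objective: alternative
-- what changed: B inverts the loop nesting: it computes the LCM with a Euclidean gcd instead of A's trial-division scan, builds the candidate times 1..lcm once, filters that list per signal by the signal's yellow window, and returns the first surviving time (or -1), instead of A's time-outer loop with an early-break inner scan over signals.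
-- outside the precondition, e.g. on solution([[5]]): A returns -1, B raises IndexError; on solution([[-1, -1], [-2, -1]]): A returns -1, B returns -1
import Mathlib
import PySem

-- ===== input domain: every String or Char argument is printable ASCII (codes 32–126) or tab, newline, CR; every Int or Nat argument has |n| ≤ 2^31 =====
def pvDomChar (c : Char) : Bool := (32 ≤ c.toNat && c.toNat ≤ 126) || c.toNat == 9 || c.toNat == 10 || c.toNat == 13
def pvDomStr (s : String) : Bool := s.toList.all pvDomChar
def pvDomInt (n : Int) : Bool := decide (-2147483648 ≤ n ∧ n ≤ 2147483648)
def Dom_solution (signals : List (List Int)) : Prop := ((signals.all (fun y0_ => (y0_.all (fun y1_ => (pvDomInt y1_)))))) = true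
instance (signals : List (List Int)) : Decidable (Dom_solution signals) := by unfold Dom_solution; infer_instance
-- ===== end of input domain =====

-- B inverts A's loop nesting: a Euclidean-gcd lcm, then the candidate times 1..lcm are filtered once
-- per signal by that signal's yellow window; the first survivor (or -1) is the answer (objective: alternative).

-- ===== PORT A =====

-- helper lcm(a,b): first i in range(max(a,b), a*b+1) divisible by both, else None.
-- Python's range is a lazy iterator, so the loop is ported as a counting recursion
-- (the remaining iteration count is the fuel), not as a materialised list.
def lcmLoop (a b : Int) (i : Int) : Nat → Option Int
  | 0 => none
  | fuel + 1 =>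
    if PySem.Int.mod i a = 0 ∧ PySem.Int.mod i b = 0 then some i
    else lcmLoop a b (i + 1) fuel

def lcmA (a b : Int) : Option Int :=
  lcmLoop a b (max a b) ((a * b + 1) - max a b).toNat

-- inner `for i in range(n)` loop of A: count of consecutive yellow signals, with break.
-- Python indexes signals[i][0] / signals[i][1]; the .getD 0 default is dead inside Pre_ (lists have length ≥ 2);
-- on shorter lists Python raises IndexError, which Pre_ excludes.
def cntA (tm : Int) : List (Int × List Int) → Int → Int
  | [], cnt => cnt
  | (c, s) :: rest, cnt =>
    if PySem.Int.mod tm c ≤ PySem.List.pyGetD s 0 0 then cnt          -- green: break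
    else if PySem.Int.mod tm c ≤ PySem.List.pyGetD s 0 0 + PySem.List.pyGetD s 1 0 then
      cntA tm rest (cnt + 1)                                          -- yellow
    else cnt                                                          -- red: break

-- outer `for time in range(1, lm+1)` loop with answer/break; the lazy range is again
-- ported as a counting recursion over the remaining iteration count.
def timeA (pairs : List (Int × List Int)) (n : Int) (t : Int) : Nat → Int
  | 0 => -1
  | fuel + 1 => if cntA t pairs 0 = n then t else timeA pairs n (t + 1) fuel

def solution (signals : List (List Int)) : Int :=
  let n : Int := signals.length
  let cycle := signals.map List.sum
  match cycle with
  | [] => -1        -- Python raises IndexError at cycle[0]; excluded by Pre_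
  | c0 :: rest =>
    match rest.foldl (fun acc c => acc.bind (fun lm => lcmA lm c)) (some c0) with
    | none => -1    -- Python raises TypeError inside lcm(None, _); excluded by Pre_
    | some lm => timeA (cycle.zip signals) n 1 (lm + 1 - 1).toNat

-- ===== PORT B =====

-- decrease lemma for the Euclidean loop (cited by gcdB's decreasing_by)
theorem pvModAbs_lt (a b : Int) (hb : b ≠ 0) : (PySem.Int.mod a b).natAbs < b.natAbs := by
  rcases lt_or_gt_of_ne hb with h | h
  · have := PySem.Int.mod_neg_bounds a h; omega
  · have h1 := PySem.Int.mod_nonneg a h; have h2 := PySem.Int.mod_lt a h; omega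

-- helper gcd(a,b): Euclid's while-loop
def gcdB (a b : Int) : Int :=
  if hb0 : b = 0 then a else gcdB b (PySem.Int.mod a b)
termination_by b.natAbs
decreasing_by exact pvModAbs_lt a b hb0

def solution_alt (signals : List (List Int)) : Int :=
  let cycles := signals.map List.sum
  match cycles with
  | [] => -1        -- Python raises IndexError at cycles[0]; excluded by Pre_
  | c0 :: rest =>
    let lm := rest.foldl (fun lm c => PySem.Int.floordiv (lm * c) (gcdB lm c)) c0
    let cand := (signals.zip cycles).foldl (fun cand p =>
      cand.filter (fun t =>
        decide (PySem.List.pyGetD p.1 0 0 < PySem.Int.mod t p.2) &&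
        decide (PySem.Int.mod t p.2 ≤ PySem.List.pyGetD p.1 0 0 + PySem.List.pyGetD p.1 1 0)))
      (PySem.List.pyRange 1 (lm + 1) 1)
    match cand with
    | [] => -1
    | t :: _ => t

-- ===== PRECONDITION & SPEC =====
-- Pre_ keeps the natural domain: every signal has at least its green and yellow components, and with
-- two or more signals every cycle length (the list sum) is positive. Outside it A raises
-- (IndexError / ZeroDivisionError / TypeError from lcm returning None) except for accidental corners
-- where A still returns -1: signals shorter than 2 entries (A's break order never reaches the missing
-- index, B's natural window read raises there) and multi-signal inputs with nonpositive cycles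
-- (values of A's trial-division lcm loop outside its intended positive domain).
def Pre_solution (signals : List (List Int)) : Prop :=
  signals ≠ [] ∧ (∀ l ∈ signals, 2 ≤ l.length) ∧
    (1 < signals.length → ∀ l ∈ signals, 1 ≤ l.sum)
instance (signals : List (List Int)) : Decidable (Pre_solution signals) := by
  unfold Pre_solution; infer_instance

def pvWitness_solution : List (List Int) := [[2, 1, 3], [1, 2, 2]]

def Spec_solution (signals : List (List Int)) (out : Int) : Prop := out = solution_alt signals
instance (signals : List (List Int)) (out : Int) : Decidable (Spec_solution signals out) := by
  unfold Spec_solution; infer_instance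

-- ===== CLAIM (what is proved, stated in full; the proofs are below) =====
def Claim_equal_solution : Prop :=
  ∀ (signals : List (List Int)), Dom_solution signals → Pre_solution signals →
    Spec_solution signals (solution signals)

-- ===== LEMMAS AND PROOFS =====

-- lemmas part 1: arithmetic
theorem pv_gcd_emod (a b : Int) : Int.gcd a (b % a) = Int.gcd a b := by
  conv_rhs => rw [← Int.emod_add_mul_ediv b a, mul_comm]
  exact (Int.gcd_add_mul_right_right a (b % a) (b / a)).symm

theorem gcdB_eq_gcd (a b : Int) (ha : 0 ≤ a) (hb : 0 ≤ b) : gcdB a b = (Int.gcd a b : Int) := by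
  rw [gcdB]
  split_ifs with hb0
  · subst hb0
    simp [Int.gcd, Int.natAbs_of_nonneg ha]
  · have hbpos : (0:Int) < b := lt_of_le_of_ne hb (Ne.symm hb0)
    have hmod : PySem.Int.mod a b = a % b := PySem.Int.mod_eq_emod_of_pos hbpos
    rw [hmod]
    rw [gcdB_eq_gcd b (a % b) hb (Int.emod_nonneg a hb0)]
    rw [show Int.gcd b (a % b) = Int.gcd a b from by rw [pv_gcd_emod b a, Int.gcd_comm]]
termination_by b.natAbs
decreasing_by rw [← hmod]; exact pvModAbs_lt a b hb0

theorem stepB_eq (a b : Int) (ha : 1 ≤ a) (hb : 1 ≤ b) :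
    PySem.Int.floordiv (a * b) (gcdB a b) = (Int.lcm a b : Int) := by
  rw [gcdB_eq_gcd a b (by omega) (by omega)]
  have hg : (0:Int) < Int.gcd a b := by
    exact_mod_cast Int.gcd_pos_of_ne_zero_left b (by omega)
  rw [PySem.Int.floordiv_eq_ediv_of_pos hg]
  have hmul : ((Int.gcd a b : Int)) * ((Int.lcm a b : Int)) = a * b := by
    have := Int.gcd_mul_lcm a b
    have h1 : (a.natAbs : Int) = a := Int.natAbs_of_nonneg (by omega)
    have h2 : (b.natAbs : Int) = b := Int.natAbs_of_nonneg (by omega)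
    have := congrArg (fun n : Nat => (n : Int)) this
    push_cast at this
    rw [abs_of_pos (by omega : (0:Int) < a), abs_of_pos (by omega : (0:Int) < b)] at this
    exact_mod_cast this
  rw [← hmul, Int.mul_ediv_cancel_left _ (by omega)]

theorem find?_min_of_pairwise {L : List Int} (hL : L.Pairwise (· < ·)) {p : Int → Bool} {m : Int}
    (h : L.find? p = some m) : ∀ t ∈ L, p t = true → m ≤ t := by
  induction L with
  | nil => simp at h
  | cons a L ih =>
    intro t ht hpt
    rcases List.pairwise_cons.mp hL with ⟨halt, hLp⟩
    by_cases hpa : p a = true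
    · rw [List.find?_cons_of_pos hpa] at h
      cases h
      rcases List.mem_cons.mp ht with rfl | ht'
      · exact le_refl t
      · exact le_of_lt (halt t ht')
    · rw [List.find?_cons_of_neg (by simpa using hpa)] at h
      rcases List.mem_cons.mp ht with rfl | ht'
      · exact absurd hpt hpa
      · exact ih hLp h t ht' hpt

theorem lcmLoop_eq (a b : Int) (fuel : Nat) : ∀ lo : Int,
    lcmLoop a b lo fuel = (PySem.List.pyRange lo (lo + fuel) 1).find?
      (fun i => decide (PySem.Int.mod i a = 0) && decide (PySem.Int.mod i b = 0)) := by
  induction fuel with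
  | zero =>
    intro lo
    rw [PySem.List.pyRange_one_eq_nil (by simp)]
    rfl
  | succ f ih =>
    intro lo
    rw [PySem.List.pyRange_one_cons (by push_cast; omega), List.find?_cons]
    simp only [lcmLoop]
    by_cases h : PySem.Int.mod lo a = 0 ∧ PySem.Int.mod lo b = 0
    · simp [h]
    · have hfalse : (decide (PySem.Int.mod lo a = 0) && decide (PySem.Int.mod lo b = 0)) = false := by
        simp only [Bool.and_eq_false_iff, decide_eq_false_iff_not]
        tauto
      rw [if_neg h, hfalse, ih (lo + 1)]
      congr 1
      push_cast
      ring_nf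

theorem lcmA_eq (a b : Int) (ha : 1 ≤ a) (hb : 1 ≤ b) : lcmA a b = some ((Int.lcm a b : Nat) : Int) := by
  set L : Int := ((Int.lcm a b : Nat) : Int) with hLdef
  have hLpos : (0:Int) < L := by
    have : 0 < Int.lcm a b := Nat.lcm_pos (by positivity : 0 < a.natAbs) (by positivity : 0 < b.natAbs)
    rw [hLdef]; exact_mod_cast this
  have hda : a ∣ L := Int.dvd_lcm_left a b
  have hdb : b ∣ L := Int.dvd_lcm_right a b
  have haL : a ≤ L := Int.le_of_dvd hLpos hda
  have hbL : b ≤ L := Int.le_of_dvd hLpos hdb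
  have hLab : L ≤ a * b := by
    have h1 : (a.natAbs : Int) = a := Int.natAbs_of_nonneg (by omega)
    have h2 : (b.natAbs : Int) = b := Int.natAbs_of_nonneg (by omega)
    have hd : Int.lcm a b ∣ a.natAbs * b.natAbs := Nat.lcm_dvd ⟨b.natAbs, rfl⟩ ⟨a.natAbs, Nat.mul_comm _ _⟩
    have : L ∣ a * b := by
      rw [hLdef, ← h1, ← h2]
      exact_mod_cast Int.natCast_dvd_natCast.mpr hd
    exact Int.le_of_dvd (by positivity) this
  have hmemL : L ∈ PySem.List.pyRange (max a b) (a * b + 1) 1 :=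
    PySem.List.mem_pyRange_one.mpr ⟨by omega, by omega⟩
  have hpL : (decide (PySem.Int.mod L a = 0) && decide (PySem.Int.mod L b = 0)) = true := by
    simp [PySem.Int.mod_eq_zero_iff_dvd]; exact ⟨hda, hdb⟩
  have hm : max a b ≤ a * b + 1 := by
    have h1 : a ≤ a * b := le_mul_of_one_le_right (by omega) hb
    have h2 : b ≤ a * b := le_mul_of_one_le_left (by omega) ha
    rcases max_choice a b with h | h <;> rw [h] <;> omega
  rw [show lcmA a b = (PySem.List.pyRange (max a b) (a * b + 1) 1).find?
      (fun i => decide (PySem.Int.mod i a = 0) && decide (PySem.Int.mod i b = 0)) from by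
    rw [lcmA, lcmLoop_eq a b _ (max a b),
      show max a b + ((((a * b + 1) - max a b).toNat : Nat) : Int) = a * b + 1 from by omega]]
  cases hf : (PySem.List.pyRange (max a b) (a * b + 1) 1).find?
      (fun i => decide (PySem.Int.mod i a = 0) && decide (PySem.Int.mod i b = 0)) with
  | none => exact absurd (List.find?_eq_none.mp hf L hmemL) (by simp [hpL])
  | some m =>
    have hpm := List.find?_some hf
    have hmmem := List.mem_of_find?_eq_some hf
    have hmrange := PySem.List.mem_pyRange_one.mp hmmem
    have hdam : a ∣ m ∧ b ∣ m := by
      constructor <;> [rw [← PySem.Int.mod_eq_zero_iff_dvd]; rw [← PySem.Int.mod_eq_zero_iff_dvd]] <;>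
        · simp at hpm; omega
    have hLm : L ≤ m := by
      have hmnn : (0:Int) ≤ m := by omega
      have hd : Int.lcm a b ∣ m.natAbs :=
        Nat.lcm_dvd (Int.natAbs_dvd_natAbs.mpr hdam.1) (Int.natAbs_dvd_natAbs.mpr hdam.2)
      have : L ∣ m := by
        rw [hLdef, ← Int.natAbs_of_nonneg hmnn]
        exact_mod_cast Int.natCast_dvd_natCast.mpr hd
      exact Int.le_of_dvd (by omega) this
    have hmL : m ≤ L := find?_min_of_pairwise (PySem.List.pairwise_lt_pyRange_one _ _) hf L hmemL hpL
    have : m = L := le_antisymm hmL hLm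
    simp [this]

-- the yellow-window test both programs apply to one signal at time tm
def ylB (tm c : Int) (s : List Int) : Bool :=
  decide (PySem.List.pyGetD s 0 0 < PySem.Int.mod tm c) &&
  decide (PySem.Int.mod tm c ≤ PySem.List.pyGetD s 0 0 + PySem.List.pyGetD s 1 0)

theorem folds_eq (rest : List Int) (a : Int) (h : ∀ c ∈ rest, 1 ≤ c) (ha : 1 ≤ a) :
    rest.foldl (fun acc c => acc.bind (fun lm => lcmA lm c)) (some a)
      = some (rest.foldl (fun lm c => PySem.Int.floordiv (lm * c) (gcdB lm c)) a)
    ∧ 1 ≤ rest.foldl (fun lm c => PySem.Int.floordiv (lm * c) (gcdB lm c)) a := by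
  induction rest generalizing a with
  | nil => exact ⟨rfl, ha⟩
  | cons c rest ih =>
    have hc : 1 ≤ c := h c (by simp)
    have hstep : PySem.Int.floordiv (a * c) (gcdB a c) = ((Int.lcm a c : Nat) : Int) :=
      stepB_eq a c ha hc
    have hl : lcmA a c = some ((Int.lcm a c : Nat) : Int) := lcmA_eq a c ha hc
    have hpos : 1 ≤ ((Int.lcm a c : Nat) : Int) := by
      have : 0 < Int.lcm a c := Nat.lcm_pos (by omega) (by omega)
      exact_mod_cast this
    simp only [List.foldl_cons, Option.bind_some, hl, hstep]
    exact ih _ (fun c' hc' => h c' (by simp [hc'])) hpos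

theorem cntA_eq_iff (tm : Int) (pairs : List (Int × List Int)) (cnt : Int) :
    cntA tm pairs cnt = cnt + (pairs.length : Int) ↔ ∀ p ∈ pairs, ylB tm p.1 p.2 = true := by
  induction pairs generalizing cnt with
  | nil => simp [cntA]
  | cons p rest ih =>
    obtain ⟨c, s⟩ := p
    simp only [cntA]
    split_ifs with h1 h2
    · constructor
      · intro heq; exfalso; simp only [List.length_cons] at heq; push_cast at heq; omega
      · intro hall; exfalso
        have := hall (c, s) (by simp)
        simp only [ylB, Bool.and_eq_true, decide_eq_true_eq] at this
        omega
    · have heq : cnt + (((c, s) :: rest).length : Int) = (cnt + 1) + (rest.length : Int) := by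
        simp only [List.length_cons]; push_cast; ring
      rw [heq, ih (cnt + 1)]
      constructor
      · intro hall p hp
        rcases List.mem_cons.mp hp with rfl | hp'
        · simp only [ylB, Bool.and_eq_true, decide_eq_true_eq]; omega
        · exact hall p hp'
      · intro hall p hp; exact hall p (by simp [hp])
    · constructor
      · intro heq; exfalso; simp only [List.length_cons] at heq; push_cast at heq; omega
      · intro hall; exfalso
        have := hall (c, s) (by simp)
        simp only [ylB, Bool.and_eq_true, decide_eq_true_eq] at this
        omega

theorem timeA_eq_find (pairs : List (Int × List Int)) (n : Int) (fuel : Nat) : ∀ t : Int,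
    timeA pairs n t fuel
      = ((PySem.List.pyRange t (t + fuel) 1).find?
          (fun u => decide (cntA u pairs 0 = n))).getD (-1) := by
  induction fuel with
  | zero =>
    intro t
    rw [PySem.List.pyRange_one_eq_nil (by simp)]
    rfl
  | succ f ih =>
    intro t
    rw [PySem.List.pyRange_one_cons (by push_cast; omega), List.find?_cons]
    simp only [timeA]
    by_cases h : cntA t pairs 0 = n
    · simp [h]
    · rw [if_neg h, show (decide (cntA t pairs 0 = n)) = false by simp [h], ih (t + 1)]
      congr 2
      push_cast
      ring_nf

theorem forall_zip_swap {α β : Type} (l1 : List α) (l2 : List β) (f : α → β → Prop) :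
    (∀ p ∈ l1.zip l2, f p.1 p.2) ↔ (∀ p ∈ l2.zip l1, f p.2 p.1) := by
  constructor
  · intro h p hp
    have : Prod.swap p ∈ List.map Prod.swap (l2.zip l1) := List.mem_map_of_mem hp
    rw [List.zip_swap] at this
    exact h p.swap this
  · intro h p hp
    rw [← List.zip_swap l2 l1] at hp
    obtain ⟨q, hq, rfl⟩ := List.mem_map.mp hp
    exact h q hq


theorem filter_fold_spec (zs : List (List Int × Int)) (cand : List Int) :
    zs.foldl (fun cand p =>
      cand.filter (fun t =>
        decide (PySem.List.pyGetD p.1 0 0 < PySem.Int.mod t p.2) &&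
        decide (PySem.Int.mod t p.2 ≤ PySem.List.pyGetD p.1 0 0 + PySem.List.pyGetD p.1 1 0))) cand
    = cand.filter (fun t => zs.all (fun p => ylB t p.2 p.1)) := by
  induction zs generalizing cand with
  | nil => simp
  | cons z zr ih =>
    rw [List.foldl_cons, ih, List.filter_filter]
    apply List.filter_congr
    intro t _
    simp only [List.all_cons, ylB]
    cases h1 : decide (PySem.List.pyGetD z.1 0 0 < PySem.Int.mod t z.2) <;>
      cases h2 : decide (PySem.Int.mod t z.2 ≤ PySem.List.pyGetD z.1 0 0 + PySem.List.pyGetD z.1 1 0) <;>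
      simp

theorem solution_spec : Claim_equal_solution := by
  unfold Claim_equal_solution
  intro signals _hdom hpre
  obtain ⟨hne, hlen2, hsum⟩ := hpre
  unfold Spec_solution
  cases signals with
  | nil => exact absurd rfl hne
  | cons s0 srest =>
    set lm := (srest.map List.sum).foldl (fun lm c => PySem.Int.floordiv (lm * c) (gcdB lm c))
      s0.sum with hlmdef
    have hfA : (srest.map List.sum).foldl (fun acc c => acc.bind (fun lm => lcmA lm c))
        (some s0.sum) = some lm := by
      cases srest with
      | nil => rfl
      | cons s1 srest' =>
        have hmulti : 1 < (s0 :: s1 :: srest').length := by simp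
        have hc0 : 1 ≤ s0.sum := hsum hmulti s0 (by simp)
        have hrest : ∀ c ∈ (s1 :: srest').map List.sum, 1 ≤ c := by
          intro c hc
          obtain ⟨l, hl, rfl⟩ := List.mem_map.mp hc
          exact hsum hmulti l (by simp [List.mem_cons.mp hl])
        exact (folds_eq ((s1 :: srest').map List.sum) s0.sum hrest hc0).1
    have hA : solution (s0 :: srest)
        = ((PySem.List.pyRange 1 (lm + 1) 1).find?
            (fun u => decide (cntA u ((s0.sum :: srest.map List.sum).zip (s0 :: srest)) 0
              = (((s0 :: srest).length : Int))))).getD (-1) := by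
      simp only [solution, List.map_cons, hfA]
      rw [timeA_eq_find _ _ _ 1]
      congr 2
      by_cases hlm : 0 ≤ lm
      · congr 1; omega
      · rw [PySem.List.pyRange_one_eq_nil (by omega), PySem.List.pyRange_one_eq_nil (by omega)]
    have hB : solution_alt (s0 :: srest) =
        (match (PySem.List.pyRange 1 (lm + 1) 1).filter
          (fun t => (((s0, s0.sum) :: srest.zip (srest.map List.sum)).all
            (fun p => ylB t p.2 p.1))) with
         | [] => (-1 : Int)
         | t :: _ => t) := by
      simp only [solution_alt, List.map_cons, List.zip_cons_cons, ← hlmdef,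
        filter_fold_spec]
    rw [hA, hB]
    set pairs := (s0.sum :: srest.map List.sum).zip (s0 :: srest) with hpairsdef
    have hlen : (pairs.length : Int) = (((s0 :: srest).length : Int)) := by
      simp [hpairsdef]
    have hpq : ∀ t ∈ PySem.List.pyRange 1 (lm + 1) 1,
        (decide (cntA t pairs 0 = ((s0 :: srest).length : Int)))
          = (((s0, s0.sum) :: srest.zip (srest.map List.sum)).all (fun p => ylB t p.2 p.1)) := by
      intro t _
      have hiff : (cntA t pairs 0 = ((s0 :: srest).length : Int)) ↔
          (∀ p ∈ (s0, s0.sum) :: srest.zip (srest.map List.sum), ylB t p.2 p.1 = true) := by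
        rw [show (cntA t pairs 0 = ((s0 :: srest).length : Int)) ↔
            (cntA t pairs 0 = 0 + (pairs.length : Int)) from by
          constructor <;> intro h <;> omega]
        rw [cntA_eq_iff t pairs 0, hpairsdef,
          forall_zip_swap (s0.sum :: srest.map List.sum) (s0 :: srest)
            (fun c s => ylB t c s = true)]
        rw [show (s0 :: srest).zip (s0.sum :: srest.map List.sum)
            = (s0, s0.sum) :: srest.zip (srest.map List.sum) from List.zip_cons_cons ..]
      apply Bool.eq_iff_iff.mpr
      rw [decide_eq_true_eq, List.all_eq_true]
      exact hiff
    rw [show List.find? (fun t => decide (cntA t pairs 0 = ((s0 :: srest).length : Int)))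
        (PySem.List.pyRange 1 (lm + 1) 1)
        = (List.filter (fun t => decide (cntA t pairs 0 = ((s0 :: srest).length : Int)))
            (PySem.List.pyRange 1 (lm + 1) 1)).head? from List.head?_filter.symm]
    rw [List.filter_congr hpq]
    cases hflt : (PySem.List.pyRange 1 (lm + 1) 1).filter
        (fun t => (((s0, s0.sum) :: srest.zip (srest.map List.sum)).all (fun p => ylB t p.2 p.1))) with
    | nil => rfl
    | cons t rest => rfl
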